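-- pv_equiv track=rewrite | github.com/timi09/Algoritms | task2/shift_or.py | shift_or
-- ===== SOURCE A (Python) =====
-- def shift_or(str, substr): #shift_and
--     n = len(substr)
--     m = len(str)
--     old_mask = [1] * n #[0] * n
--     enter_inds = []
--     for i in range(m):
--         bit_shift(old_mask)
--         mask = bit_mask(str[i], substr)
--         old_mask = bit_or(old_mask, mask) #bit_and(old_mask, mask)
--         if old_mask[len(old_mask)-1] == 0: # == 1
--             enter_inds.append(i-n+1)
--     return enter_inds
--
-- def bit_mask(symb, substr):
--     n = len(substr)
--     mask = [1] * n #[0] * n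
--     for i in range(n):
--         if substr[i] == symb:
--             mask[i] = 0 #mask[i] = 1
--     return mask
--
-- def bit_shift(old_mask):
--     old_mask.pop()
--     old_mask.insert(0, 0) #old_mask.insert(0, 1)
--
-- def bit_or(mask1, mask2):
--     return [a|b for a,b in zip(mask1,mask2)]
-- ===== SOURCE B (Python) =====
-- def shift_or(str, substr):
--     n = len(substr)
--     return [i for i in range(len(str) - n + 1) if str[i:i+n] == substr]
-- ===== Notes on version B (the rewrite author's own statement) =====
-- stated objective: idiomatic
-- what changed: Replaces the shift-or bit-list automaton (a fresh per-character mask list, pop/insert shift and zip-or per text position, match read off the state's last bit) by a direct sliding-window comprehension that compares str[i:i+n] with substr at each candidate start; no automaton state at all.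
-- outside the precondition, e.g. on shift_or('', ''): A returns [], B returns [0]
import Mathlib
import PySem

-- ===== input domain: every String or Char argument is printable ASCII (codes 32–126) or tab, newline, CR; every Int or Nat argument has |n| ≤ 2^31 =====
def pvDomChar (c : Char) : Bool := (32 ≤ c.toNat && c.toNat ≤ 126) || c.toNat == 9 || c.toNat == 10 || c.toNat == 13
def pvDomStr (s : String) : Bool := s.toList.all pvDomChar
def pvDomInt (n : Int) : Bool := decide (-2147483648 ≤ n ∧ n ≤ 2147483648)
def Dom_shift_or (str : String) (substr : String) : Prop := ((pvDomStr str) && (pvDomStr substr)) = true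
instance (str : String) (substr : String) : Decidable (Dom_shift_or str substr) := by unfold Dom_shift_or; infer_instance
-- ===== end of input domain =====

-- B drops A's shift-or bit-list automaton entirely and checks each candidate window
-- str[i:i+n] == substr directly (objective: idiomatic; return values proved equal on Pre_).

-- ===== PORT A =====
-- bit_mask(symb, substr): [1]*n then for i in range(n): if substr[i]==symb: mask[i]=0
-- (range(n) indices are nonnegative, so Nat indexing is exact here)
def bit_mask_A (symb : Char) (substr : List Char) : List Int :=
  (List.range substr.length).foldl
    (fun mask i => if substr[i]? == some symb then mask.set i 0 else mask)
    (List.replicate substr.length (1 : Int))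

-- bit_shift: old_mask.pop(); old_mask.insert(0, 0)  (pop on [] raises IndexError; such
-- inputs are excluded by Pre_shift_or)
def bit_shift_A (old_mask : List Int) : List Int := 0 :: old_mask.dropLast

-- bit_or: [a|b for a,b in zip(mask1, mask2)]
def bit_or_A (mask1 mask2 : List Int) : List Int :=
  (mask1.zip mask2).map (fun ab => Int.lor ab.1 ab.2)

-- the body of A's 'for i in range(m)' loop (state: old_mask, enter_inds)
def shiftOrStepA (p : List Char) (st : List Int × List Int) (ic : Int × Char) :
    List Int × List Int :=
  let om := bit_or_A (bit_shift_A st.1) (bit_mask_A ic.2 p)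
  (om, if PySem.List.pyGet? om ((om.length : Int) - 1) == some 0
       then st.2 ++ [ic.1 - (p.length : Int) + 1] else st.2)

def shift_or (str : String) (substr : String) : List Int :=
  ((PySem.List.enumerate str.toList).foldl (shiftOrStepA substr.toList)
    (List.replicate substr.toList.length (1 : Int), [])).2

-- ===== PORT B =====
-- [i for i in range(len(str) - n + 1) if str[i:i+n] == substr]
def shift_or_alt (str : String) (substr : String) : List Int :=
  (PySem.List.pyRange 0 ((str.toList.length : Int) - (substr.toList.length : Int) + 1) 1).filter
    (fun i => PySem.List.slice str.toList (some i) (some (i + (substr.toList.length : Int)))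
              == substr.toList)

-- ===== PRECONDITION & SPEC =====
-- Pre_ excludes empty substr: with nonempty str A raises IndexError (pop from the empty
-- mask list); at ("", "") A happens to return [] while B's natural empty-pattern value is
-- [0] — a defensible corner of an unspecified empty pattern, so it is excluded too.
def Pre_shift_or (str : String) (substr : String) : Prop := substr ≠ ""
instance (str : String) (substr : String) : Decidable (Pre_shift_or str substr) := by
  unfold Pre_shift_or; infer_instance

def pvWitness_shift_or : String × String := ("abcabc ab", "ab")

def Spec_shift_or (str : String) (substr : String) (out : List Int) : Prop := out = shift_or_alt str substr
instance (str : String) (substr : String) (out : List Int) : Decidable (Spec_shift_or str substr out) := by unfold Spec_shift_or; infer_instance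

-- ===== CLAIM (what is proved, stated in full; the proofs are below) =====
def Claim_equal_shift_or : Prop := ∀ (str : String) (substr : String), Dom_shift_or str substr → Pre_shift_or str substr → Spec_shift_or str substr (shift_or str substr)

-- ===== LEMMAS AND PROOFS =====

-- matchAt p t j : the suffix of t of length j+1 equals the prefix of p of length j+1
def matchAt (p t : List Char) (j : Nat) : Bool :=
  decide (j + 1 ≤ t.length ∧ t.drop (t.length - (j + 1)) = p.take (j + 1))

-- A's mask state after processing prefix t, characterised positionally
def maskOf (p t : List Char) : List Int :=
  (List.range p.length).map (fun j => if matchAt p t j then 0 else 1)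

-- the matches A appends while consuming r after the already-processed prefix t
def matchList (p t r : List Char) : List Int :=
  match r with
  | [] => []
  | c :: r' =>
      (if matchAt p (t ++ [c]) (p.length - 1)
       then [((t.length : Int)) - (p.length : Int) + 1] else [])
      ++ matchList p (t ++ [c]) r'

theorem maskOf_nil (p : List Char) : maskOf p [] = List.replicate p.length 1 := by
  apply List.ext_getElem <;> simp [maskOf, matchAt]

theorem mask_build (p : List Char) (c : Char) : ∀ (k : Nat), k ≤ p.length →
    (List.range k).foldl
        (fun mask i => if p[i]? == some c then mask.set i 0 else mask)
        (List.replicate p.length (1 : Int))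
      = (p.take k).map (fun pc => if pc = c then (0 : Int) else 1)
          ++ List.replicate (p.length - k) 1 := by
  intro k
  induction k with
  | zero => intro _; simp
  | succ k ih =>
    intro hk
    have hk' : k < p.length := by omega
    rw [List.range_succ, List.foldl_append, ih (by omega)]
    simp only [List.foldl_cons, List.foldl_nil]
    have hget : p[k]? = some p[k] := List.getElem?_eq_getElem hk'
    have hlenA : ((p.take k).map (fun pc => if pc = c then (0 : Int) else 1)).length = k := by
      simp [List.length_take, Nat.min_eq_left (by omega : k ≤ p.length)]
    have hrep : List.replicate (p.length - k) (1 : Int)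
        = 1 :: List.replicate (p.length - (k + 1)) 1 := by
      have : p.length - k = (p.length - (k + 1)) + 1 := by omega
      rw [this, List.replicate_succ]
    have htake : p.take (k + 1) = p.take k ++ [p[k]] := by
      rw [List.take_succ, hget]; rfl
    by_cases hc : p[k] = c
    · rw [hget]
      simp only [hc, beq_self_eq_true, if_pos rfl]
      rw [List.set_append, hlenA]
      simp only [Nat.lt_irrefl, Nat.sub_self]
      rw [hrep, htake, List.map_append]
      simp [hc]
    · rw [hget]
      have hbeq : (some p[k] == some c) = false := by simp [hc]
      rw [hbeq, if_neg (by simp), hrep, htake, List.map_append]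
      simp [hc]

theorem bit_mask_A_eq (c : Char) (p : List Char) :
    bit_mask_A c p = p.map (fun pc => if pc = c then (0 : Int) else 1) := by
  unfold bit_mask_A
  rw [mask_build p c p.length le_rfl]
  simp

theorem matchAt_append_zero (p t : List Char) (c : Char) (hp : 0 < p.length) :
    matchAt p (t ++ [c]) 0 = decide (p[0] = c) := by
  unfold matchAt
  rw [decide_eq_decide]
  have hdrop : (t ++ [c]).drop ((t ++ [c]).length - (0 + 1)) = [c] := by
    simp
  have htake : p.take (0 + 1) = [p[0]] := by
    cases p with
    | nil => simp at hp
    | cons x xs => rfl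
  rw [hdrop, htake]
  constructor
  · rintro ⟨-, h⟩
    injection h with h
    exact h.symm
  · intro h
    exact ⟨by simp, by rw [h]⟩

theorem matchAt_append_succ (p t : List Char) (c : Char) (j : Nat) (hj : j + 1 < p.length) :
    matchAt p (t ++ [c]) (j + 1) = (matchAt p t j && decide (p[j + 1] = c)) := by
  rw [Bool.eq_iff_iff]
  unfold matchAt
  simp only [Bool.and_eq_true, decide_eq_true_eq]
  by_cases hlen : j + 1 ≤ t.length
  · have hdrop : (t ++ [c]).drop ((t ++ [c]).length - (j + 1 + 1))
        = t.drop (t.length - (j + 1)) ++ [c] := by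
      have h1 : (t ++ [c]).length - (j + 1 + 1) = t.length - (j + 1) := by simp
      rw [h1, List.drop_append_of_le_length (by omega)]
    have htake : p.take (j + 1 + 1) = p.take (j + 1) ++ [p[j + 1]] := by
      rw [List.take_succ, List.getElem?_eq_getElem hj]; rfl
    have hL1 : (t.drop (t.length - (j + 1))).length = j + 1 := by simp; omega
    have hL2 : (p.take (j + 1)).length = j + 1 := by simp; omega
    rw [hdrop, htake]
    constructor
    · rintro ⟨-, h⟩
      rcases List.append_inj h (by rw [hL1, hL2]) with ⟨h1, h2⟩
      injection h2 with h2
      exact ⟨⟨hlen, h1⟩, h2.symm⟩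
    · rintro ⟨⟨-, h1⟩, h2⟩
      refine ⟨?_, by rw [h1, h2]⟩
      simp only [List.length_append, List.length_cons, List.length_nil]
      omega
  · constructor
    · rintro ⟨h, -⟩
      exfalso
      simp only [List.length_append, List.length_cons, List.length_nil] at h
      omega
    · rintro ⟨⟨h, -⟩, -⟩
      exact absurd h hlen

theorem step_mask (p t : List Char) (c : Char) (hp : p ≠ []) :
    bit_or_A (bit_shift_A (maskOf p t)) (bit_mask_A c p) = maskOf p (t ++ [c]) := by
  have hn : 0 < p.length := List.length_pos_iff.mpr hp
  rw [bit_mask_A_eq]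
  apply List.ext_getElem
  · simp [bit_or_A, bit_shift_A, maskOf]
    omega
  · intro i h1 h2
    have hi : i < p.length := by simpa [maskOf] using h2
    simp only [bit_or_A, bit_shift_A, maskOf, List.getElem_map, List.getElem_zip,
      List.getElem_range]
    cases i with
    | zero =>
      rw [matchAt_append_zero p t c hn]
      simp only [List.getElem_cons_zero]
      by_cases h : p[0] = c <;> simp [h] <;> decide
    | succ j =>
      simp only [List.getElem_cons_succ]
      rw [List.getElem_dropLast]
      simp only [List.getElem_map, List.getElem_range]
      rw [matchAt_append_succ p t c j hi]
      cases hm2 : matchAt p t j <;> by_cases h : p[j + 1] = c <;>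
        simp [h, hm2] <;> decide

theorem test_eq (p t : List Char) (hp : p ≠ []) :
    (PySem.List.pyGet? (maskOf p t) (((maskOf p t).length : Int) - 1) == some 0)
      = matchAt p t (p.length - 1) := by
  have hn : 0 < p.length := List.length_pos_iff.mpr hp
  have hlen : (maskOf p t).length = p.length := by simp [maskOf]
  have hc : (((maskOf p t).length : Int) - 1) = ((p.length - 1 : Nat) : Int) := by
    rw [hlen]; omega
  rw [hc, PySem.List.pyGet?_natCast, List.getElem?_eq_getElem (by rw [hlen]; omega)]
  have hval : (maskOf p t)[p.length - 1]'(by rw [hlen]; omega)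
      = if matchAt p t (p.length - 1) then (0 : Int) else 1 := by
    simp [maskOf]
  rw [hval]
  cases h : matchAt p t (p.length - 1) <;> simp

theorem loopA (p : List Char) (hp : p ≠ []) :
    ∀ (r t : List Char) (acc : List Int),
      ((PySem.List.enumerate r ((t.length : Int))).foldl (shiftOrStepA p) (maskOf p t, acc)).2
        = acc ++ matchList p t r := by
  intro r
  induction r with
  | nil => intro t acc; simp [PySem.List.enumerate_nil, matchList]
  | cons c r' ih =>
    intro t acc
    rw [PySem.List.enumerate_cons, List.foldl_cons]
    have hstep : shiftOrStepA p (maskOf p t, acc) ((t.length : Int), c)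
        = (maskOf p (t ++ [c]),
           acc ++ (if matchAt p (t ++ [c]) (p.length - 1)
                   then [((t.length : Int)) - (p.length : Int) + 1] else [])) := by
      simp only [shiftOrStepA]
      rw [step_mask p t c hp, test_eq p (t ++ [c]) hp]
      cases h : matchAt p (t ++ [c]) (p.length - 1) <;> simp [h]
    rw [hstep]
    have hcast : ((t.length : Int) + 1) = (((t ++ [c]).length : Nat) : Int) := by
      simp
    rw [hcast, ih (t ++ [c])]
    rw [matchList, List.append_assoc]

theorem matchList_eq (p s : List Char) :
    ∀ (r t : List Char), t ++ r = s →
      matchList p t r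
        = (List.range' t.length r.length).filterMap
            (fun i => if matchAt p (s.take (i + 1)) (p.length - 1)
                      then some ((i : Int) - (p.length : Int) + 1) else none) := by
  intro r
  induction r with
  | nil => intro t _; simp [matchList]
  | cons c r' ih =>
    intro t hs
    have hrange : List.range' t.length (c :: r').length
        = t.length :: List.range' (t.length + 1) r'.length := by
      simp [List.range'_succ]
    rw [hrange, List.filterMap_cons]
    have htake : s.take (t.length + 1) = t ++ [c] := by
      rw [← hs, show t ++ c :: r' = (t ++ [c]) ++ r' by simp,
        List.take_append_of_le_length (by simp)]
      simp
    have hs' : (t ++ [c]) ++ r' = s := by simp [← hs]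
    have ihx := ih (t ++ [c]) hs'
    simp only [List.length_append, List.length_cons, List.length_nil] at ihx
    rw [matchList, ihx, htake]
    cases h : matchAt p (t ++ [c]) (p.length - 1) <;> simp [h]

theorem filterMap_if {α β : Type} (l : List α) (q : α → Bool) (f : α → β) :
    l.filterMap (fun x => if q x then some (f x) else none) = (l.filter q).map f := by
  induction l with
  | nil => simp
  | cons x l ih =>
    by_cases h : q x <;> simp [h, ih]

-- reindexing: A records end positions i = (n-1)+j, B start positions j
theorem final_eq (p s : List Char) (hp : p ≠ []) :
    matchList p [] s
      = (PySem.List.pyRange 0 ((s.length : Int) - (p.length : Int) + 1) 1).filter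
          (fun i => PySem.List.slice s (some i) (some (i + (p.length : Int))) == p) := by
  have hn : 0 < p.length := List.length_pos_iff.mpr hp
  rw [matchList_eq p s s [] rfl]
  simp only [List.length_nil, ← List.range_eq_range']
  by_cases hm : s.length < p.length
  · -- text shorter than pattern: both sides empty
    rw [PySem.List.pyRange_one_eq_nil (by push_cast; omega), List.filter_nil,
      List.filterMap_eq_nil_iff.mpr]
    intro i hi
    rw [List.mem_range] at hi
    have hcond : matchAt p (s.take (i + 1)) (p.length - 1) = false := by
      simp only [matchAt, decide_eq_false_iff_not, not_and]
      intro hle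
      exfalso
      rw [List.length_take] at hle
      omega
    simp [hcond]
  · -- p.length ≤ s.length
    have hnm : p.length ≤ s.length := by omega
    set K := s.length - p.length + 1 with hK
    have hsplit : s.length = (p.length - 1) + K := by omega
    have hKc : ((s.length : Int) - (p.length : Int) + 1) = ((K : Nat) : Int) := by
      push_cast
      omega
    have halt : (PySem.List.pyRange 0 ((s.length : Int) - (p.length : Int) + 1) 1).filter
          (fun i => PySem.List.slice s (some i) (some (i + (p.length : Int))) == p)
        = ((List.range K).filter
            (fun j => (s.drop j).take p.length == p)).map (fun j : Nat => ((j : Nat) : Int)) := by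
      rw [hKc, PySem.List.pyRange_one]
      simp only [Int.sub_zero, Int.toNat_natCast, zero_add]
      rw [List.filter_map]
      congr 1
      apply List.filter_congr
      intro j hj
      simp only [Function.comp]
      rw [PySem.List.slice_natCast_add]
    rw [halt]
    have hfirst : (List.range (p.length - 1)).filterMap
        (fun i => if matchAt p (s.take (i + 1)) (p.length - 1)
                  then some ((i : Int) - (p.length : Int) + 1) else none) = [] := by
      rw [List.filterMap_eq_nil_iff]
      intro i hi
      rw [List.mem_range] at hi
      have hcond : matchAt p (s.take (i + 1)) (p.length - 1) = false := by
        simp only [matchAt, decide_eq_false_iff_not, not_and]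
        intro hle
        exfalso
        rw [List.length_take] at hle
        omega
      simp [hcond]
    have hsecond : ∀ j ∈ List.range K,
        ((fun i => if matchAt p (s.take (i + 1)) (p.length - 1)
                   then some ((i : Int) - (p.length : Int) + 1) else none)
          ∘ (fun x => p.length - 1 + x)) j
        = (fun j : Nat => if (s.drop j).take p.length == p
                          then some ((j : Nat) : Int) else none) j := by
      intro j hj
      rw [List.mem_range] at hj
      have hlen2 : p.length - 1 + j + 1 = p.length + j := by omega
      have htk : (s.take (p.length + j)).length = p.length + j := by
        rw [List.length_take]; omega
      have hcond : matchAt p (s.take (p.length - 1 + j + 1)) (p.length - 1)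
          = ((s.drop j).take p.length == p) := by
        rw [hlen2]
        unfold matchAt
        have hdt : (s.take (p.length + j)).drop ((s.take (p.length + j)).length - (p.length - 1 + 1))
            = (s.drop j).take p.length := by
          rw [htk, show p.length + j - (p.length - 1 + 1) = j by omega, List.drop_take]
          congr 1
          omega
        have hpt : p.take (p.length - 1 + 1) = p := by
          rw [show p.length - 1 + 1 = p.length by omega, List.take_length]
        rw [hdt, hpt, htk]
        by_cases h : (s.drop j).take p.length = p
        · simp [h] <;> omega
        · simp [h]
      simp only [Function.comp]
      rw [hcond]
      by_cases h : ((s.drop j).take p.length == p) = true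
      · rw [h, if_pos rfl, if_pos rfl]
        congr 1
        push_cast
        omega
      · rw [Bool.not_eq_true] at h
        rw [h]
        simp
    rw [show List.range s.length
          = List.range (p.length - 1) ++ (List.range K).map (fun x => p.length - 1 + x) from by
        rw [← List.range_add, ← hsplit],
      List.filterMap_append, List.filterMap_map, hfirst, List.nil_append,
      List.filterMap_congr hsecond, filterMap_if]

-- ===== VERDICT (by name: the statement is the Claim_ definition above) =====
theorem shift_or_spec : Claim_equal_shift_or := by
  intro str substr hdom hpre
  unfold Spec_shift_or
  have hp : substr.toList ≠ [] := by
    intro h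
    exact hpre (String.toList_inj.mp (by simp [h]))
  unfold shift_or shift_or_alt
  have hl := loopA substr.toList hp str.toList [] []
  rw [maskOf_nil] at hl
  simp only [List.length_nil, Nat.cast_zero, List.nil_append] at hl
  rw [hl, final_eq substr.toList str.toList hp]
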